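-- pv_equiv track=rewrite | github.com/zkeschner/CS50 | faces/faces.py | convert
-- ===== SOURCE A (Python) =====
-- def convert(str):
--     new = ""
--     check = False
--     for i in str:
--         if check == False:
--             if i == ":":
--                 check = True
--             else:
--                 new += i
--         else:
--             if i == "(":
--                 new += '\U0001F641'
--                 check = False
--             elif i == ")":
--                 new += '\U0001F642'
--                 check = False
--     return new
-- ===== SOURCE B (Python) =====
-- def _emoji_tail(part):
--     # part contains no ':'; replace the text up to the first paren by the emoji,
--     # keep the remainder verbatim; a paren-free part is dropped entirely.
--     for k, c in enumerate(part):
--         if c == '(':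
--             return '\U0001F641' + part[k + 1:]
--         if c == ')':
--             return '\U0001F642' + part[k + 1:]
--     return ''
--
--
-- def convert(str):
--     parts = str.split(':')
--     out = parts[0]
--     for part in parts[1:]:
--         out += _emoji_tail(part)
--     return out
-- ===== Notes on version B (the rewrite author's own statement) =====
-- stated objective: faster
-- what changed: A scans character by character with a boolean skip-flag state machine; B splits the input once at every colon separator and rewrites each later segment independently (its first paren becomes the emoji, the prefix before it is dropped, a paren-free segment vanishes), then concatenates the pieces, letting str.split and slicing do the bulk copying.
import Mathlib
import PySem

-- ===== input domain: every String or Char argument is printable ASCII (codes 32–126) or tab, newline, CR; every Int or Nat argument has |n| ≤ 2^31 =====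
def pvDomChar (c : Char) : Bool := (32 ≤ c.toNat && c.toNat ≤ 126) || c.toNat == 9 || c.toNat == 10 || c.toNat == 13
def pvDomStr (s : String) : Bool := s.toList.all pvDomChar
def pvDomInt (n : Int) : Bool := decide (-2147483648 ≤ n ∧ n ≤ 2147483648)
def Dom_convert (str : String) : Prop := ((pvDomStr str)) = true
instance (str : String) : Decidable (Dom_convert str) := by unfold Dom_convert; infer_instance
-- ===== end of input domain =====

-- B replaces A's character-by-character flag automaton by one split on ':' plus a
-- per-segment rewrite (objective: faster, measured; same return value).

-- ===== PORT A =====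
-- the loop body of A: state = (new, check)
def convertStep (st : List Char × Bool) (i : Char) : List Char × Bool :=
  if st.2 = false then
    if i = ':' then (st.1, true) else (st.1 ++ [i], st.2)
  else
    if i = '(' then (st.1 ++ ['🙁'], false)
    else if i = ')' then (st.1 ++ ['🙂'], false)
    else st

def convert (str : String) : String :=
  String.ofList (str.toList.foldl convertStep ([], false)).1

-- ===== PORT B =====
-- _emoji_tail: scan the (':'-free) segment for the first paren; emoji + remainder, or ''
def emojiTail (part : List Char) : List Char :=
  match part with
  | [] => []
  | c :: rest =>
    if c = '(' then '🙁' :: rest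
    else if c = ')' then '🙂' :: rest
    else emojiTail rest

def convert_alt (str : String) : String :=
  let parts := PySem.Chars.splitOn str.toList [':']
  let out := PySem.List.pyGetD parts 0 []
  String.ofList ((PySem.List.slice parts (some 1) none).foldl
    (fun acc part => acc ++ emojiTail part) out)

-- ===== PRECONDITION & SPEC =====
def Spec_convert (str : String) (out : String) : Prop := out = convert_alt str
instance (str : String) (out : String) : Decidable (Spec_convert str out) := by unfold Spec_convert; infer_instance

-- ===== CLAIM (what is proved, stated in full; the proofs are below) =====
def Claim_equal_convert : Prop := ∀ (str : String), Dom_convert str → Spec_convert str (convert str)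

-- ===== LEMMAS AND PROOFS =====

-- proof-side model of str.split(':') on char lists
def splitChar : List Char → List (List Char)
  | [] => [[]]
  | c :: cs => if c = ':' then [] :: splitChar cs else (splitChar cs).modifyHead (c :: ·)

lemma splitChar_ne_nil (cs : List Char) : splitChar cs ≠ [] := by
  induction cs with
  | nil => simp [splitChar]
  | cons c cs ih =>
    simp only [splitChar]
    split_ifs
    · simp
    · cases h : splitChar cs with
      | nil => exact absurd h ih
      | cons p ps => simp [List.modifyHead]

lemma splitOn_go_spec (fuel : Nat) : ∀ (l cur : List Char) (acc : List (List Char)), l.length ≤ fuel →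
    PySem.Chars.splitOn.go [':'] fuel l cur acc
      = acc.reverse ++ (splitChar l).modifyHead (cur.reverse ++ ·) := by
  induction fuel with
  | zero =>
    intro l cur acc h
    have hl : l = [] := List.length_eq_zero_iff.mp (Nat.le_zero.mp h)
    subst hl
    simp [PySem.Chars.splitOn.go, splitChar, List.modifyHead]
  | succ fuel ih =>
    intro l cur acc h
    cases l with
    | nil => simp [PySem.Chars.splitOn.go, splitChar, List.modifyHead]
    | cons c rest =>
      have hlen : rest.length ≤ fuel := by simp at h; omega
      by_cases hc : c = ':'
      · subst hc
        have hpre : [':'].isPrefixOf (':' :: rest) = true := by simp [List.isPrefixOf]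
        rw [PySem.Chars.splitOn.go]
        simp only [hpre, if_true, List.length_singleton, List.drop_succ_cons, List.drop_zero]
        rw [ih rest [] (cur.reverse :: acc) hlen]
        cases hsp : splitChar rest with
        | nil => exact absurd hsp (splitChar_ne_nil rest)
        | cons p ps => simp [splitChar, List.modifyHead, hsp]
      · have hpre : [':'].isPrefixOf (c :: rest) = false := by
          have hb : (':' == c) = false := beq_eq_false_iff_ne.mpr (fun h => hc h.symm)
          simp [List.isPrefixOf, hb]
        rw [PySem.Chars.splitOn.go]
        simp only [hpre, Bool.false_eq_true, if_false]
        rw [ih rest (c :: cur) acc hlen]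
        simp only [splitChar, hc, if_false, List.reverse_cons]
        cases hsp : splitChar rest with
        | nil => exact absurd hsp (splitChar_ne_nil rest)
        | cons p ps => simp [List.modifyHead]

lemma splitOn_eq (l : List Char) : PySem.Chars.splitOn l [':'] = splitChar l := by
  unfold PySem.Chars.splitOn
  rw [splitOn_go_spec (l.length + 1) l [] [] (by omega)]
  cases h : splitChar l with
  | nil => exact absurd h (splitChar_ne_nil l)
  | cons p ps => simp [List.modifyHead]

-- the output of A's loop from the normal state (N) and from the skip state (K)
mutual
def convN : List Char → List Char
  | [] => []
  | c :: cs => if c = ':' then convK cs else c :: convN cs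
def convK : List Char → List Char
  | [] => []
  | c :: cs =>
    if c = '(' then '🙁' :: convN cs
    else if c = ')' then '🙂' :: convN cs
    else convK cs
end

lemma convert_loop (cs : List Char) : ∀ acc : List Char,
    ((cs.foldl convertStep (acc, false)).1 = acc ++ convN cs)
      ∧ ((cs.foldl convertStep (acc, true)).1 = acc ++ convK cs) := by
  induction cs with
  | nil => intro acc; simp [convN, convK]
  | cons c cs ih =>
    intro acc
    constructor
    · rw [List.foldl_cons]
      by_cases hc : c = ':'
      · subst hc
        simpa [convertStep, convN] using (ih acc).2
      · simpa [convertStep, hc, convN] using (ih (acc ++ [c])).1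
    · rw [List.foldl_cons]
      by_cases hp : c = '('
      · subst hp
        simpa [convertStep, convK] using (ih (acc ++ ['🙁'])).1
      · by_cases hq : c = ')'
        · subst hq
          simpa [convertStep, convK] using (ih (acc ++ ['🙂'])).1
        · simpa [convertStep, hp, hq, convK] using (ih acc).2

lemma conv_split (cs : List Char) :
    (convN cs = (splitChar cs).headD [] ++ (((splitChar cs).tail).map emojiTail).flatten)
      ∧ (convK cs = ((splitChar cs).map emojiTail).flatten) := by
  induction cs with
  | nil => simp [convN, convK, splitChar, emojiTail]
  | cons c cs ih =>
    obtain ⟨ihN, ihK⟩ := ih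
    cases hsp : splitChar cs with
    | nil => exact absurd hsp (splitChar_ne_nil cs)
    | cons p ps =>
      rw [hsp] at ihN ihK
      by_cases hc : c = ':'
      · subst hc
        constructor
        · simp only [convN, if_true, splitChar, ihK, hsp]
          simp
        · simp only [convK, splitChar, if_true, hsp] at *
          simp [ihK, emojiTail]
      · have hsplit : splitChar (c :: cs) = (c :: p) :: ps := by
          simp [splitChar, hc, hsp, List.modifyHead]
        constructor
        · simp only [convN, hc, if_false, hsplit, ihN]
          simp
        · by_cases hp : c = '('
          · subst hp
            simp only [convK, if_true, hsplit, List.map_cons, List.flatten_cons, emojiTail]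
            simp [ihN]
          · by_cases hq : c = ')'
            · subst hq
              simp only [convK, hp, if_false, if_true, hsplit, List.map_cons,
                List.flatten_cons, emojiTail]
              simp [ihN]
            · simp only [convK, hp, hq, if_false, hsplit, List.map_cons, List.flatten_cons]
              simp [emojiTail, hp, hq, ihK]

-- ===== VERDICT (by name: the statement is the Claim_ definition above) =====
theorem convert_spec : Claim_equal_convert := by
  intro s _
  unfold Spec_convert convert convert_alt
  rw [splitOn_eq, (convert_loop s.toList []).1]
  simp only [PySem.List.slice_from_one, PySem.List.pyGetD_zero,
    PySem.List.foldl_append_eq_flatMap]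
  cases hsp : splitChar s.toList with
  | nil => exact absurd hsp (splitChar_ne_nil s.toList)
  | cons p ps =>
    rw [(conv_split s.toList).1, hsp]
    simp [List.flatMap_def]
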